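-- pv_equiv track=rewrite | github.com/lupengyu/ais | Decoder.py | bits_to_Complementnumbers
-- ===== SOURCE A (Python) =====
-- def bits_to_Complementnumbers(str):
--     sum = 0
--     length = len(str)
--     for i in range(1, length):
--         sum += int(str[i]) * pow(2, length - 2)
--         length -= 1
--     if str[0] == "1":
--         sum = (pow(2, len(str) - 1) - sum) * -1
--     return sum
-- ===== SOURCE B (Python) =====
-- def bits_to_Complementnumbers(str):
--     acc = 0
--     for c in str[1:]:
--         acc = acc * 2 + int(c)
--     if str[0] == "1":
--         acc = -(2 ** (len(str) - 1) - acc)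
--     return acc
-- ===== Notes on version B (the rewrite author's own statement) =====
-- stated objective: alternative
-- what changed: Replaces the positional-powers sum (pow(2, length-2) with a decrementing length counter) by a Horner-rule accumulator acc = acc*2 + int(c) over str[1:], keeping the identical sign fold on str[0].
import Mathlib
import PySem

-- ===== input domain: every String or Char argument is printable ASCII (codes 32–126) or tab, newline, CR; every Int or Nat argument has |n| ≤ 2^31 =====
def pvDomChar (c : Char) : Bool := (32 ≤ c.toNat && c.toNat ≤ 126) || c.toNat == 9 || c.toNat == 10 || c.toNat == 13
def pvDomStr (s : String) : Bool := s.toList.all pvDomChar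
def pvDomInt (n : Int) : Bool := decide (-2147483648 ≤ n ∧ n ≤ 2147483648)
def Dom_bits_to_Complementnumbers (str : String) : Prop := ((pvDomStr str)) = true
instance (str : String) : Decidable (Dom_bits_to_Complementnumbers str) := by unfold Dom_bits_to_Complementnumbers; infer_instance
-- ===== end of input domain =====

-- B replaces A's positional-powers sum by a Horner accumulator (objective: alternative decomposition, same cost).

-- int(c) for a one-character string c; 0 only outside Pre_ (Python raises ValueError there)
def pvIntChar (c : Char) : Int := (PySem.Int.ofChars? [c]).getD 0

-- ===== PORT A =====
def bits_to_Complementnumbers (str : String) : Int :=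
  let cs := str.toList
  let n : Int := cs.length
  -- for i in range(1, length): sum += int(str[i]) * pow(2, length-2); length -= 1
  -- the exponent length-2 is ≥ 0 at every iteration (length = n-i+1 ≥ 2), so .toNat is exact
  let p := (PySem.List.pyRange 1 n 1).foldl
    (fun (sl : Int × Int) i =>
      (sl.1 + pvIntChar (PySem.List.pyGetD cs i ' ') * 2 ^ (sl.2 - 2).toNat, sl.2 - 1))
    (0, n)
  let sum := p.1
  if PySem.List.pyGetD cs 0 ' ' == '1' then (2 ^ (cs.length - 1) - sum) * -1 else sum

-- ===== PORT B =====
def bits_to_Complementnumbers_alt (str : String) : Int :=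
  let cs := str.toList
  let acc := (cs.drop 1).foldl (fun a c => a * 2 + pvIntChar c) 0
  if PySem.List.pyGetD cs 0 ' ' == '1' then -(2 ^ (cs.length - 1) - acc) else acc

-- ===== PRECONDITION & SPEC =====
-- Pre_ excludes exactly the inputs where the Python A raises: the empty string (IndexError on
-- str[0]) and strings with a non-digit character after position 0 (ValueError from int(str[i])).
def Pre_bits_to_Complementnumbers (str : String) : Prop :=
  str.toList ≠ [] ∧ ((str.toList.drop 1).all (fun c => 48 ≤ c.toNat && c.toNat ≤ 57)) = true
instance (str : String) : Decidable (Pre_bits_to_Complementnumbers str) := by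
  unfold Pre_bits_to_Complementnumbers; infer_instance
def pvWitness_bits_to_Complementnumbers : String := "1010"

def Spec_bits_to_Complementnumbers (str : String) (out : Int) : Prop := out = bits_to_Complementnumbers_alt str
instance (str : String) (out : Int) : Decidable (Spec_bits_to_Complementnumbers str out) := by unfold Spec_bits_to_Complementnumbers; infer_instance

-- ===== CLAIM (what is proved, stated in full; the proofs are below) =====
def Claim_equal_bits_to_Complementnumbers : Prop := ∀ (str : String), Dom_bits_to_Complementnumbers str → Pre_bits_to_Complementnumbers str → Spec_bits_to_Complementnumbers str (bits_to_Complementnumbers str)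

-- ===== LEMMAS AND PROOFS =====

-- Horner fold with an arbitrary start value shifts by a power of two
theorem pv_horner_shift (ts : List Char) (a : Int) :
    ts.foldl (fun x c => x * 2 + pvIntChar c) a
      = a * 2 ^ ts.length + ts.foldl (fun x c => x * 2 + pvIntChar c) 0 := by
  induction ts generalizing a with
  | nil => simp
  | cons c ts ih =>
    simp only [List.foldl_cons, List.length_cons]
    rw [ih (a * 2 + pvIntChar c), ih (0 * 2 + pvIntChar c)]
    ring

-- A's loop, started at (s, |ts|+1), computes s plus the Horner value of ts
theorem pv_loopA_eq_horner (ts : List Char) (s : Int) :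
    (ts.foldl
      (fun (sl : Int × Int) c =>
        (sl.1 + pvIntChar c * 2 ^ (sl.2 - 2).toNat, sl.2 - 1))
      (s, (ts.length : Int) + 1)).1
      = s + ts.foldl (fun x c => x * 2 + pvIntChar c) 0 := by
  induction ts generalizing s with
  | nil => simp
  | cons c ts ih =>
    simp only [List.foldl_cons, List.length_cons]
    push_cast
    have h2 : ((ts.length : Int) + 1 + 1 - 2) = (ts.length : Int) := by ring
    have h4 : ((ts.length : Int) + 1 + 1 - 1) = (ts.length : Int) + 1 := by ring
    rw [h2, h4, Int.toNat_natCast, ih]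
    rw [pv_horner_shift ts (0 + pvIntChar c)]
    ring

-- ===== VERDICT (by name: the statement is the Claim_ definition above) =====
theorem bits_to_Complementnumbers_spec : Claim_equal_bits_to_Complementnumbers := by
  intro str _ hpre
  unfold Spec_bits_to_Complementnumbers
  unfold bits_to_Complementnumbers bits_to_Complementnumbers_alt
  obtain ⟨hne, _⟩ := hpre
  dsimp only
  -- rewrite A's indexed fold over range(1, n) as a fold over the dropped tail
  rw [PySem.List.foldl_pyRange_pyGetD' str.toList ' '
    (fun (sl : Int × Int) c => (sl.1 + pvIntChar c * 2 ^ (sl.2 - 2).toNat, sl.2 - 1))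
    (0, (str.toList.length : Int)) (by norm_num : (0:Int) ≤ 1)]
  have hpos : 0 < str.toList.length := List.length_pos_iff.mpr hne
  have hlen : ((str.toList.drop 1).length : Int) + 1 = (str.toList.length : Int) := by
    simp only [List.length_drop]; omega
  simp only [show (1 : Int).toNat = 1 from rfl]
  rw [← hlen, pv_loopA_eq_horner]
  split <;> ring
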